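-- pv_equiv track=rewrite | github.com/sirzzang/coding-practice | algo-study/week06_주식가격.py | solution
-- ===== SOURCE A (Python) =====
-- def solution(prices):
--     answer = [0]*len(prices)
--     stack = []
--
--     for i in range(len(prices)):
--         if not stack:
--             stack.append(i)
--         else:
--         # 스택 top 시간의 주식 가격이 현재 주식 가격보다 크면,
--         # 주식 가격이 유지되지 않은 것
--             while stack and prices[stack[-1]] > prices[i]:
--                 top = stack.pop()
--                 answer[top] = i - top
--             stack.append(i)
--
--     # 마지막까지 떨어지지 않은 주식 가격
--     while stack:
--         top = stack.pop()
--         answer[top] = len(prices) - top - 1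
--     return answer
-- ===== SOURCE B (Python) =====
-- def solution(prices):
--     n = len(prices)
--     answer = []
--     for i in range(n):
--         d = n - 1 - i
--         for j in range(i + 1, n):
--             if prices[j] < prices[i]:
--                 d = j - i
--                 break
--         answer.append(d)
--     return answer
-- ===== Notes on version B (the rewrite author's own statement) =====
-- stated objective: simpler
-- what changed: Replaces the monotonic index stack with in-place answer updates by a direct per-index forward scan that finds the first strictly lower later price.
import Mathlib
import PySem

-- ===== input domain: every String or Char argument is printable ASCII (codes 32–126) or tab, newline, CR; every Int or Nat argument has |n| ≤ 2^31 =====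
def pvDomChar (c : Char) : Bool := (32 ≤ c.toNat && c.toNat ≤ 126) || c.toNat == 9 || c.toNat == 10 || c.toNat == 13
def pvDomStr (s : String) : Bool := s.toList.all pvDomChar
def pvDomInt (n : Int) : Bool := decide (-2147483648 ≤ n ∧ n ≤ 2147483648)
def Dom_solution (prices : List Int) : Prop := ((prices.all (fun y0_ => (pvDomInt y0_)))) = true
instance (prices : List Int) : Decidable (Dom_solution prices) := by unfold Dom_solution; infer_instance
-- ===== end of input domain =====

-- B replaces A's monotonic index stack with a per-index forward scan for the first lower price (simpler, no stack state).

-- ===== PORT A =====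
-- the inner `while stack and prices[stack[-1]] > prices[i]` loop; stack head = Python stack top,
-- all indices are in range so `getD _ 0` is exact for `prices[...]`
def popLoopA (p : List Int) (i : Nat) : List Nat → List Int → List Nat × List Int
  | [], ans => ([], ans)
  | top :: rest, ans =>
    if p.getD top 0 > p.getD i 0 then
      popLoopA p i rest (ans.set top ((i : Int) - (top : Int)))
    else (top :: rest, ans)

-- one iteration of A's `for i in range(len(prices))` body
def stepA (p : List Int) (st : List Nat × List Int) (i : Nat) : List Nat × List Int :=
  if st.1.isEmpty then (i :: st.1, st.2)
  else
    let r := popLoopA p i st.1 st.2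
    (i :: r.1, r.2)

-- the trailing `while stack:` loop
def finalLoopA (n : Nat) : List Nat → List Int → List Int
  | [], ans => ans
  | top :: rest, ans => finalLoopA n rest (ans.set top ((n : Int) - (top : Int) - 1))

def solution (prices : List Int) : List Int :=
  let n := prices.length
  let r := (List.range n).foldl (stepA prices) ([], List.replicate n 0)
  finalLoopA n r.1 r.2

-- ===== PORT B =====
-- the inner `for j in range(i+1, n)` scan with its break; `dflt` is B's initial d = n-1-i
def innerB (p : List Int) (pi : Int) (i : Nat) (dflt : Int) : List Nat → Int
  | [] => dflt
  | j :: rest => if p.getD j 0 < pi then (j : Int) - (i : Int) else innerB p pi i dflt rest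

def solution_alt (prices : List Int) : List Int :=
  let n := prices.length
  (List.range n).map (fun i =>
    innerB prices (prices.getD i 0) i ((n : Int) - 1 - (i : Int)) (List.range' (i + 1) (n - (i + 1))))

-- ===== PRECONDITION & SPEC =====
def Spec_solution (prices : List Int) (out : List Int) : Prop := out = solution_alt prices
instance (prices : List Int) (out : List Int) : Decidable (Spec_solution prices out) := by unfold Spec_solution; infer_instance

-- ===== CLAIM (what is proved, stated in full; the proofs are below) =====
def Claim_equal_solution : Prop := ∀ (prices : List Int), Dom_solution prices → Spec_solution prices (solution prices)

-- ===== LEMMAS AND PROOFS =====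

-- the common specification value: distance to the first strictly lower later price, else n-1-i
def specv (p : List Int) (j : Nat) : Int :=
  match (List.range' (j + 1) (p.length - (j + 1))).find? (fun m => p.getD m 0 < p.getD j 0) with
  | some m => (m : Int) - (j : Int)
  | none => (p.length : Int) - 1 - (j : Int)

lemma innerB_eq_find (p : List Int) (pi : Int) (i : Nat) (dflt : Int) (l : List Nat) :
    innerB p pi i dflt l =
      match l.find? (fun m => p.getD m 0 < pi) with
      | some m => (m : Int) - (i : Int)
      | none => dflt := by
  induction l with
  | nil => simp [innerB]
  | cons j rest ih =>
    simp only [innerB, List.find?, List.getD] at *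
    by_cases h : p[j]?.getD 0 < pi
    · simp [h]
    · simp [h, ih]

lemma find?_range'_eq_some (pred : Nat → Bool) (kk : Nat) :
    ∀ (a len : Nat), a ≤ kk → kk < a + len → pred kk = true →
      (∀ m, a ≤ m → m < kk → pred m = false) →
      (List.range' a len).find? pred = some kk := by
  intro a len
  induction len generalizing a with
  | zero => omega
  | succ len ih =>
    intro h1 h2 h3 h4
    rw [List.range'_succ]
    by_cases hak : a = kk
    · subst hak; simp [List.find?, h3]
    · have hpa : pred a = false := h4 a le_rfl (by omega)
      simp only [List.find?, hpa]
      exact ih (a + 1) (by omega) (by omega) h3 (fun m hm1 hm2 => h4 m (by omega) hm2)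

lemma find?_range'_eq_none (pred : Nat → Bool) (a len : Nat)
    (h : ∀ m, a ≤ m → m < a + len → pred m = false) :
    (List.range' a len).find? pred = none := by
  rw [List.find?_eq_none]
  intro m hm
  rw [List.mem_range'_1] at hm
  simp [h m hm.1 hm.2]

lemma foldl_set_length (f : Nat → Int) (l : List Nat) :
    ∀ (a : List Int), (l.foldl (fun ans t => ans.set t (f t)) a).length = a.length := by
  induction l with
  | nil => intro a; simp
  | cons hd tl ih => intro a; simp [List.foldl, ih]

lemma foldl_set_getD (f : Nat → Int) (l : List Nat) :
    ∀ (a : List Int) (j : Nat), l.Nodup → (∀ t ∈ l, t < a.length) →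
      (l.foldl (fun ans t => ans.set t (f t)) a).getD j 0 =
        if j ∈ l then f j else a.getD j 0 := by
  induction l with
  | nil => intro a j _ _; simp
  | cons hd tl ih =>
    intro a j hnd hlen
    have hhd : hd < a.length := hlen hd (by simp)
    have hnd' := (List.nodup_cons.mp hnd)
    rw [List.foldl_cons, ih (a.set hd (f hd)) j hnd'.2 (by simpa using fun t ht => hlen t (List.mem_cons_of_mem _ ht))]
    by_cases hj : j ∈ tl
    · simp [hj, List.mem_cons_of_mem _ hj]
    · by_cases hje : j = hd
      · subst hje
        simp [hj, List.getD, hhd]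
      · have hjc : j ∉ hd :: tl := by simp [hje, hj]
        simp only [if_neg hj, if_neg hjc, List.getD]
        rw [List.getElem?_set_ne (by omega)]

-- the loop invariant of A's main for-loop: after processing indices [0, k),
-- the stack holds exactly the indices < k with no later lower price yet, in decreasing order,
-- and answer holds specv for resolved indices and 0 otherwise
structure InvA (p : List Int) (k : Nat) (s : List Nat) (ans : List Int) : Prop where
  kle : k ≤ p.length
  len : ans.length = p.length
  sorted : s.Pairwise (fun a b => b < a)
  mem : ∀ j, j ∈ s ↔ (j < k ∧ ∀ m, j < m → m < k → p.getD j 0 ≤ p.getD m 0)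
  val : ∀ j, ans.getD j 0 = if j < k ∧ j ∉ s then specv p j else 0

lemma popLoopA_eq (p : List Int) (i : Nat) (s : List Nat) :
    ∀ (a : List Int), popLoopA p i s a =
      (s.dropWhile (fun t => p.getD i 0 < p.getD t 0),
       (s.takeWhile (fun t => p.getD i 0 < p.getD t 0)).foldl
         (fun ans t => ans.set t ((i : Int) - (t : Int))) a) := by
  induction s with
  | nil => intro a; simp [popLoopA]
  | cons top rest ih =>
    intro a
    simp only [popLoopA, gt_iff_lt, List.dropWhile, List.takeWhile, List.getD] at *
    by_cases h : p[i]?.getD 0 < p[top]?.getD 0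
    · simp [h, ih]
    · simp [h]

lemma specv_of_drop (p : List Int) (j k : Nat) (hjk : j < k) (hk : k < p.length)
    (hdrop : p.getD k 0 < p.getD j 0)
    (hmono : ∀ m, j < m → m < k → p.getD j 0 ≤ p.getD m 0) :
    specv p j = (k : Int) - (j : Int) := by
  unfold specv
  rw [find?_range'_eq_some _ k (j + 1) (p.length - (j + 1)) (by omega) (by omega)
    (decide_eq_true hdrop)
    (fun m h1 h2 => by
      simp only [decide_eq_false_iff_not, not_lt]
      exact hmono m (by omega) h2)]

lemma specv_of_nodrop (p : List Int) (j : Nat)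
    (hmono : ∀ m, j < m → m < p.length → p.getD j 0 ≤ p.getD m 0) :
    specv p j = (p.length : Int) - 1 - (j : Int) := by
  unfold specv
  rw [find?_range'_eq_none _ (j + 1) (p.length - (j + 1))
    (fun m h1 h2 => by
      simp only [decide_eq_false_iff_not, not_lt]
      exact hmono m (by omega) (by omega))]

lemma stepA_inv (p : List Int) (k : Nat) (s : List Nat) (ans : List Int)
    (h : InvA p k s ans) (hk : k < p.length) :
    InvA p (k + 1) (stepA p (s, ans) k).1 (stepA p (s, ans) k).2 := by
  obtain ⟨hkle, hlen, hsorted, hmem, hval⟩ := h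
  have hstep : stepA p (s, ans) k = (k :: (popLoopA p k s ans).1, (popLoopA p k s ans).2) := by
    unfold stepA
    cases s with
    | nil => simp [popLoopA]
    | cons a b => simp
  rw [hstep, popLoopA_eq]
  set pr : Nat → Bool := fun t => decide (p.getD k 0 < p.getD t 0) with hpr
  have htd : s.takeWhile pr ++ s.dropWhile pr = s := List.takeWhile_append_dropWhile
  have hsnd : s.Nodup := hsorted.imp (fun h => by omega)
  have hmemsplit : ∀ j, j ∈ s ↔ (j ∈ s.takeWhile pr ∨ j ∈ s.dropWhile pr) := by
    intro j
    have h2 := List.mem_append (a := j) (s := s.takeWhile pr) (t := s.dropWhile pr)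
    rw [htd] at h2
    exact h2
  have hdisj : ∀ j, j ∈ s.takeWhile pr → j ∉ s.dropWhile pr := by
    have hnd2 := hsnd; rw [← htd] at hnd2
    intro j hj1 hj2
    exact (List.nodup_append.mp hnd2).2.2 j hj1 j hj2 rfl
  have hlt : ∀ j ∈ s, j < k := fun j hj => ((hmem j).mp hj).1
  have hmono : ∀ j ∈ s, ∀ m, j < m → m < k → p.getD j 0 ≤ p.getD m 0 :=
    fun j hj => ((hmem j).mp hj).2
  have hpairs : ∀ a ∈ s, ∀ b ∈ s, b < a → p.getD b 0 ≤ p.getD a 0 := by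
    intro a ha b hb hba
    exact hmono b hb a hba (hlt a ha)
  have htk_pred : ∀ t ∈ s.takeWhile pr, p.getD k 0 < p.getD t 0 := by
    intro t ht
    have := List.mem_takeWhile_imp ht
    simpa [hpr] using this
  have hdr_pair : (s.dropWhile pr).Pairwise (fun a b => b < a) :=
    hsorted.sublist (List.dropWhile_sublist _)
  have hdr_mem : ∀ t ∈ s.dropWhile pr, t ∈ s :=
    fun t ht => (List.dropWhile_sublist pr).mem ht
  have htk_mem : ∀ t ∈ s.takeWhile pr, t ∈ s :=
    fun t ht => (List.takeWhile_sublist pr).mem ht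
  -- every surviving stack element's price is ≤ the current price p[k]
  have hdr_le : ∀ t ∈ s.dropWhile pr, p.getD t 0 ≤ p.getD k 0 := by
    cases hdrc : s.dropWhile pr with
    | nil => intro t ht; simp at ht
    | cons d rest =>
      have hdp : pr d = false := by
        have h2 := List.head?_dropWhile_not pr s
        rw [hdrc] at h2
        simpa using h2
      have hdle : p.getD d 0 ≤ p.getD k 0 := by
        simp only [hpr, decide_eq_false_iff_not, not_lt] at hdp
        exact hdp
      intro t ht
      rcases List.mem_cons.mp ht with h1 | h1
      · subst h1; exact hdle
      · have htd2 : t < d := by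
          have := hdr_pair; rw [hdrc] at this
          exact (List.pairwise_cons.mp this).1 t h1
        have hds : d ∈ s := hdr_mem d (by rw [hdrc]; simp)
        have hts : t ∈ s := hdr_mem t (by rw [hdrc]; simp [h1])
        exact le_trans (hpairs d hds t hts htd2) hdle
  refine ⟨by omega, ?_, ?_, ?_, ?_⟩
  · rw [foldl_set_length]; exact hlen
  · -- sortedness of the new stack
    refine List.pairwise_cons.mpr ⟨fun t ht => hlt t (hdr_mem t ht), hdr_pair⟩
  · -- membership characterisation at k+1
    intro j
    constructor
    · intro hj
      rcases List.mem_cons.mp hj with h1 | h1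
      · subst h1
        exact ⟨by omega, fun m hm1 hm2 => by omega⟩
      · have hjs : j ∈ s := hdr_mem j h1
        refine ⟨by have := hlt j hjs; omega, fun m hm1 hm2 => ?_⟩
        by_cases hmk : m = k
        · subst hmk; exact hdr_le j h1
        · exact hmono j hjs m hm1 (by omega)
    · rintro ⟨hjk1, hmono1⟩
      by_cases hjk : j = k
      · subst hjk; exact List.mem_cons_self
      · have hjlt : j < k := by omega
        have hjs : j ∈ s := (hmem j).mpr ⟨hjlt, fun m h1 h2 => hmono1 m h1 (by omega)⟩
        rcases (hmemsplit j).mp hjs with h1 | h1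
        · exact absurd (hmono1 k hjlt (by omega)) (by simpa using htk_pred j h1)
        · exact List.mem_cons_of_mem _ h1
  · -- answer values
    intro j
    have htk_nd : (s.takeWhile pr).Nodup := hsnd.sublist (List.takeWhile_sublist _)
    have htk_bd : ∀ t ∈ s.takeWhile pr, t < ans.length := by
      intro t ht; rw [hlen]
      have := hlt t (htk_mem t ht); omega
    rw [foldl_set_getD _ _ _ _ htk_nd htk_bd]
    by_cases hjt : j ∈ s.takeWhile pr
    · rw [if_pos hjt]
      have hjs : j ∈ s := htk_mem j hjt
      have hjlt : j < k := hlt j hjs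
      have hnot : j ∉ k :: s.dropWhile pr := by
        intro hc
        rcases List.mem_cons.mp hc with h1 | h1
        · omega
        · exact hdisj j hjt h1
      rw [if_pos ⟨by omega, hnot⟩]
      rw [specv_of_drop p j k hjlt hk (htk_pred j hjt) (hmono j hjs)]
    · rw [if_neg hjt, hval j]
      by_cases hjd : j ∈ s.dropWhile pr
      · have hjs : j ∈ s := hdr_mem j hjd
        rw [if_neg (by simp [hjs]), if_neg (by simp [List.mem_cons_of_mem _ hjd])]
      · by_cases hjk : j = k
        · subst hjk
          rw [if_neg (by omega), if_neg (by simp)]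
        · by_cases hjlt : j < k
          · have hjs : j ∉ s := fun hc => (hmemsplit j).mp hc |>.elim hjt hjd
            rw [if_pos ⟨hjlt, hjs⟩, if_pos ⟨by omega, by simp [hjk, hjd]⟩]
          · rw [if_neg (by omega), if_neg (by omega)]

lemma range_inv (p : List Int) : ∀ (k : Nat), k ≤ p.length →
    InvA p k ((List.range k).foldl (stepA p) ([], List.replicate p.length 0)).1
            ((List.range k).foldl (stepA p) ([], List.replicate p.length 0)).2 := by
  intro k
  induction k with
  | zero =>
    intro _
    refine ⟨Nat.zero_le _, by simp, by simp [List.range_zero], by simp [List.range_zero], ?_⟩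
    intro j
    rw [if_neg (by rintro ⟨h, -⟩; omega)]
    simp only [List.range_zero, List.foldl_nil, List.getD, List.getElem?_replicate]
    split <;> rfl
  | succ k ih =>
    intro hk
    rw [List.range_succ, List.foldl_append]
    exact stepA_inv p k _ _ (ih (by omega)) (by omega)

lemma finalLoopA_eq (n : Nat) (s : List Nat) :
    ∀ (a : List Int), finalLoopA n s a =
      s.foldl (fun ans t => ans.set t ((n : Int) - (t : Int) - 1)) a := by
  induction s with
  | nil => intro a; rfl
  | cons top rest ih => intro a; simp [finalLoopA, ih]

lemma solution_getD (p : List Int) :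
    (solution p).length = p.length ∧
    ∀ j, j < p.length → (solution p).getD j 0 = specv p j := by
  have hInv := range_inv p p.length le_rfl
  unfold solution
  rw [finalLoopA_eq]
  have hnd : ((List.range p.length).foldl (stepA p) ([], List.replicate p.length 0)).1.Nodup :=
    hInv.sorted.imp (fun h => by omega)
  have hbd : ∀ t ∈ ((List.range p.length).foldl (stepA p) ([], List.replicate p.length 0)).1,
      t < ((List.range p.length).foldl (stepA p) ([], List.replicate p.length 0)).2.length := by
    intro t ht
    have := (hInv.mem t).mp ht
    rw [hInv.len]
    exact this.1
  constructor
  · rw [foldl_set_length]; exact hInv.len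
  · intro j hj
    rw [foldl_set_getD _ _ _ _ hnd hbd]
    by_cases hjs : j ∈ ((List.range p.length).foldl (stepA p) ([], List.replicate p.length 0)).1
    · rw [if_pos hjs]
      have hchar := (hInv.mem j).mp hjs
      rw [specv_of_nodrop p j hchar.2]
      ring
    · rw [if_neg hjs, hInv.val j, if_pos ⟨hj, hjs⟩]

lemma solution_alt_getD (p : List Int) :
    (solution_alt p).length = p.length ∧
    ∀ j, j < p.length → (solution_alt p).getD j 0 = specv p j := by
  refine ⟨by simp [solution_alt], ?_⟩
  intro j hj
  have hlen : j < (solution_alt p).length := by simp [solution_alt, hj]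
  rw [List.getD_eq_getElem _ _ hlen]
  simp only [solution_alt, List.getElem_map, List.getElem_range]
  rw [innerB_eq_find]
  rfl

-- ===== VERDICT (by name: the statement is the Claim_ definition above) =====
theorem solution_spec : Claim_equal_solution := by
  intro p _
  unfold Spec_solution
  obtain ⟨hl1, hv1⟩ := solution_getD p
  obtain ⟨hl2, hv2⟩ := solution_alt_getD p
  apply List.ext_getElem (by omega)
  intro j h1 h2
  have e1 := hv1 j (by omega)
  have e2 := hv2 j (by omega)
  rw [List.getD_eq_getElem?_getD, List.getElem?_eq_getElem h1] at e1
  rw [List.getD_eq_getElem?_getD, List.getElem?_eq_getElem h2] at e2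
  simp at e1 e2
  rw [e1, e2]
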